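-- pv_equiv track=rewrite | github.com/PAST2212/domainthreat | domainthreat/core/utilities.py | email_and_parked
-- ===== SOURCE A (Python) =====
-- class SmoothingResults:
--     def __init__(self):
--         self.out = []
--
--     @staticmethod
--     def group_tuples_first_value(klaus) -> list:
--         out = {}
--         for elem in klaus:
--             try:
--                 out[elem[0]].extend(elem[1:])
--             except KeyError:
--                 out[elem[0]] = list(elem)
--         return [tuple(values) for values in out.values()]
--
--     def _flatten(self, nested_list: list) -> None:
--         for item in nested_list:
--             if isinstance(item, (str, bool, int, tuple)):
--                 self.out.append(item)
--             elif isinstance(item, dict):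
--                 for i in item.items():
--                     self.out.extend(i)
--
--             elif isinstance(item, list):
--                 self._flatten(item)
--             else:
--                 self.out.extend(list(item))
--
--     def get_flatten_list(self, nested_list: list) -> list:
--         self._flatten(nested_list)
--         return self.out
--
-- def email_and_parked(klaus, features) -> str:
--     features_filtered = SmoothingResults().group_tuples_first_value(features)
--     for y in features_filtered:
--         if y[0] == klaus:
--             if any(k == 'Yes' for k in y):
--                 return 'Yes'
--             else:
--                 return 'No'
-- ===== SOURCE B (Python) =====
-- def email_and_parked(klaus, features) -> str:
--     found = False
--     has_yes = False
--     for elem in features: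
--         if elem[0] == klaus:
--             found = True
--             if any(k == 'Yes' for k in elem):
--                 has_yes = True
--     if found:
--         return 'Yes' if has_yes else 'No'
-- ===== Notes on version B (the rewrite author's own statement) =====
-- stated objective: simpler
-- what changed: Replaces the build-a-grouping-dict-then-scan-its-groups structure with a single pass over features that keeps two boolean flags (key seen, 'Yes' seen among matching tuples).
import Mathlib
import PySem

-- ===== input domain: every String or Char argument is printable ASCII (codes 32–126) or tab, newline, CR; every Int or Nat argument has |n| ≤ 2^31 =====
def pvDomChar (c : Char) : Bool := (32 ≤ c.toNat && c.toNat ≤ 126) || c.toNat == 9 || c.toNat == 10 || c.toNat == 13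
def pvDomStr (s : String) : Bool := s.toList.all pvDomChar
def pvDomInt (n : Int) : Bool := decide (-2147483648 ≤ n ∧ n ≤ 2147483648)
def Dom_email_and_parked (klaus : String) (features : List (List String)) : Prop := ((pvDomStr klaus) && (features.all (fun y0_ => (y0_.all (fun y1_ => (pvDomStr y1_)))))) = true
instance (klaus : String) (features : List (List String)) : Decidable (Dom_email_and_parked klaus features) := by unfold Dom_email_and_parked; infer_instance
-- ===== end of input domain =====

-- B replaces the group-into-a-dict-then-scan-groups structure with one pass keeping two flags (simpler).

-- ===== PORT A =====
-- one iteration of A's grouping loop: out[elem[0]].extend(elem[1:]) / out[elem[0]] = list(elem)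
def pvGroupStep (d : PySem.Dict String (List String)) (elem : List String) : PySem.Dict String (List String) :=
  match PySem.List.pyGet? elem 0 with
  | none => d  -- Python raises IndexError on elem[0] here (excluded by Pre_)
  | some h =>
    match d.get? h with
    | some v => d.insert h (v ++ PySem.List.slice elem (some 1) none)
    | none => d.insert h elem

-- A's scan over the grouped tuples
def pvScanGroups (klaus : String) : List (List String) → Option String
  | [] => none
  | y :: ys =>
    match PySem.List.pyGet? y 0 with
    | none => none  -- Python raises on y[0]; unreachable (groups are nonempty)
    | some h =>
      if h == klaus then
        if y.any (fun k => k == "Yes") then some "Yes" else some "No"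
      else pvScanGroups klaus ys

def email_and_parked (klaus : String) (features : List (List String)) : Option String :=
  pvScanGroups klaus ((features.foldl pvGroupStep PySem.Dict.empty).values)

-- ===== PORT B =====
-- one iteration of B's single pass: state = (found, has_yes)
def pvFlagStep (klaus : String) (st : Bool × Bool) (elem : List String) : Bool × Bool :=
  match PySem.List.pyGet? elem 0 with
  | none => st  -- Python raises IndexError on elem[0] here (excluded by Pre_)
  | some h =>
    if h == klaus then (true, st.2 || elem.any (fun k => k == "Yes")) else st

def email_and_parked_alt (klaus : String) (features : List (List String)) : Option String :=
  let s := features.foldl (pvFlagStep klaus) (false, false)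
  if s.1 then (if s.2 then some "Yes" else some "No") else none

-- ===== PRECONDITION & SPEC =====
-- Pre_ excludes features containing an empty inner list: there A (and B) raise IndexError on elem[0].
def Pre_email_and_parked (klaus : String) (features : List (List String)) : Prop :=
  features.all (fun e => !e.isEmpty) = true
instance (klaus : String) (features : List (List String)) : Decidable (Pre_email_and_parked klaus features) := by unfold Pre_email_and_parked; infer_instance
def pvWitness_email_and_parked : String × List (List String) := ("a", [["a", "Yes"], ["b"]])

def Spec_email_and_parked (klaus : String) (features : List (List String)) (out : Option String) : Prop := out = email_and_parked_alt klaus features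
instance (klaus : String) (features : List (List String)) (out : Option String) : Decidable (Spec_email_and_parked klaus features out) := by unfold Spec_email_and_parked; infer_instance

-- ===== CLAIM (what is proved, stated in full; the proofs are below) =====
def Claim_equal_email_and_parked : Prop := ∀ (klaus : String) (features : List (List String)), Dom_email_and_parked klaus features → Pre_email_and_parked klaus features → Spec_email_and_parked klaus features (email_and_parked klaus features)

-- ===== LEMMAS AND PROOFS =====

-- the tuples of features whose first component is k
def pvMatches (k : String) (fs : List (List String)) : List (List String) :=
  fs.filter (fun e => e.headD "" == k)

theorem pvGet?_build (fs : List (List String)) (hfs : ∀ e ∈ fs, e ≠ [])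
    (d : PySem.Dict String (List String)) (k : String) :
    (fs.foldl pvGroupStep d).get? k =
      match d.get? k with
      | some v => some (v ++ (pvMatches k fs).flatMap List.tail)
      | none =>
        match pvMatches k fs with
        | [] => none
        | m :: ms => some (m ++ ms.flatMap List.tail) := by
  induction fs generalizing d with
  | nil =>
    simp [pvMatches]
    cases d.get? k <;> simp
  | cons e fs ih =>
    obtain ⟨h, t, rfl⟩ : ∃ h t, e = h :: t := by
      cases e with
      | nil => exact absurd rfl (hfs [] (by simp))
      | cons h t => exact ⟨h, t, rfl⟩
    have hfs' : ∀ e ∈ fs, e ≠ [] := fun e he => hfs e (by simp [he])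
    have hstep : pvGroupStep d (h :: t) =
        match d.get? h with
        | some v => d.insert h (v ++ t)
        | none => d.insert h (h :: t) := by
      simp [pvGroupStep, PySem.List.slice_from_one]
    have hmatch : pvMatches k ((h :: t) :: fs) =
        if h = k then (h :: t) :: pvMatches k fs else pvMatches k fs := by
      by_cases hk : h = k
      · subst hk; simp [pvMatches]
      · simp [pvMatches, hk]
    rw [List.foldl_cons, hstep]
    by_cases hk : h = k
    · subst hk
      cases hdk : d.get? h with
      | some v =>
        rw [ih hfs']
        rw [PySem.Dict.get?_insert_self, hmatch]
        simp [List.append_assoc]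
      | none =>
        rw [ih hfs']
        rw [PySem.Dict.get?_insert_self, hmatch]
        simp
    · have hne : k ≠ h := fun hh => hk hh.symm
      cases hdk : d.get? h with
      | some v =>
        rw [ih hfs', PySem.Dict.get?_insert_of_ne _ _ hne, hmatch, if_neg hk]
      | none =>
        rw [ih hfs', PySem.Dict.get?_insert_of_ne _ _ hne, hmatch, if_neg hk]

theorem pvNodupKeys (fs : List (List String)) (d : PySem.Dict String (List String))
    (h : d.keys.Nodup) : (fs.foldl pvGroupStep d).keys.Nodup := by
  induction fs generalizing d with
  | nil => simpa using h
  | cons e fs ih =>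
    refine ih _ ?_
    unfold pvGroupStep
    split
    · exact h
    · split
      · exact PySem.Dict.nodup_keys_insert _ _ _ h
      · exact PySem.Dict.nodup_keys_insert _ _ _ h

theorem pvScan_map (klaus : String) (ks : List String) (val : String → List String)
    (hval : ∀ k ∈ ks, (val k).headD "" = k ∧ val k ≠ []) :
    pvScanGroups klaus (ks.map val) =
      if klaus ∈ ks then
        (if (val klaus).any (fun s => s == "Yes") then some "Yes" else some "No")
      else none := by
  induction ks with
  | nil => simp [pvScanGroups]
  | cons k ks ih =>
    obtain ⟨hhead, hne⟩ := hval k (by simp)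
    obtain ⟨a, r, hvk⟩ : ∃ a r, val k = a :: r := by
      cases hv : val k with
      | nil => exact absurd hv hne
      | cons a r => exact ⟨a, r, rfl⟩
    have ha : a = k := by rw [hvk] at hhead; simpa using hhead
    subst ha
    have hval' : ∀ j ∈ ks, (val j).headD "" = j ∧ val j ≠ [] :=
      fun j hj => hval j (by simp [hj])
    simp only [List.map_cons, pvScanGroups, hvk, PySem.List.pyGet?_zero_cons]
    by_cases hk : a = klaus
    · subst hk
      simp [hvk]
    · have hne2 : klaus ≠ a := Ne.symm hk
      rw [if_neg (by simpa using hk), ih hval']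
      simp [List.mem_cons, hne2]

theorem pvFoldB (klaus : String) (fs : List (List String)) (hfs : ∀ e ∈ fs, e ≠ [])
    (st : Bool × Bool) :
    fs.foldl (pvFlagStep klaus) st =
      (st.1 || !(pvMatches klaus fs).isEmpty,
       st.2 || (pvMatches klaus fs).any (fun e => e.any (fun s => s == "Yes"))) := by
  induction fs generalizing st with
  | nil => simp [pvMatches]
  | cons e fs ih =>
    obtain ⟨h, t, rfl⟩ : ∃ h t, e = h :: t := by
      cases e with
      | nil => exact absurd rfl (hfs [] (by simp))
      | cons h t => exact ⟨h, t, rfl⟩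
    have hfs' : ∀ e ∈ fs, e ≠ [] := fun e he => hfs e (by simp [he])
    have hstep : pvFlagStep klaus st (h :: t) =
        if h = klaus then (true, st.2 || (h :: t).any (fun s => s == "Yes")) else st := by
      simp [pvFlagStep]
    have hmatch : pvMatches klaus ((h :: t) :: fs) =
        if h = klaus then (h :: t) :: pvMatches klaus fs else pvMatches klaus fs := by
      by_cases hk : h = klaus
      · subst hk; simp [pvMatches]
      · simp [pvMatches, hk]
    rw [List.foldl_cons, hstep, hmatch]
    by_cases hk : h = klaus
    · rw [if_pos hk, if_pos hk, ih hfs']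
      simp [Bool.or_assoc]
    · rw [if_neg hk, if_neg hk, ih hfs']

theorem pvTailAny (klaus : String) (hy : (klaus == "Yes") = false)
    (ms : List (List String)) (hms : ∀ e ∈ ms, e.headD "" = klaus ∧ e ≠ []) :
    (ms.flatMap List.tail).any (fun s => s == "Yes")
      = ms.any (fun e => e.any (fun s => s == "Yes")) := by
  induction ms with
  | nil => simp
  | cons e es ihe =>
    obtain ⟨hehead, hene⟩ := hms e (by simp)
    obtain ⟨et, rfl⟩ : ∃ et, e = klaus :: et := by
      cases e with
      | nil => exact absurd rfl hene
      | cons a et =>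
        have ha : a = klaus := by simpa using hehead
        exact ⟨et, by rw [ha]⟩
    have hms' : ∀ e ∈ es, e.headD "" = klaus ∧ e ≠ [] := fun e he => hms e (by simp [he])
    simp [ihe hms', hy]

theorem pvBridge (klaus : String) (m : List String) (ms : List (List String))
    (hm : m.headD "" = klaus) (hmne : m ≠ [])
    (hms : ∀ e ∈ ms, e.headD "" = klaus ∧ e ≠ []) :
    (m ++ ms.flatMap List.tail).any (fun s => s == "Yes")
      = (m :: ms).any (fun e => e.any (fun s => s == "Yes")) := by
  obtain ⟨mt, rfl⟩ : ∃ mt, m = klaus :: mt := by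
    cases m with
    | nil => exact absurd rfl hmne
    | cons a mt =>
      have ha : a = klaus := by simpa using hm
      exact ⟨mt, by rw [ha]⟩
  by_cases hy : klaus = "Yes"
  · subst hy
    simp
  · have hyb : (klaus == "Yes") = false := by simpa using hy
    have hflat := pvTailAny klaus hyb ms hms
    simp [List.any_append, List.any_cons, hflat, hyb]

-- ===== VERDICT (by name: the statement is the Claim_ definition above) =====
theorem email_and_parked_spec : Claim_equal_email_and_parked := by
  intro klaus fs hdom hpre0
  have hpre : ∀ e ∈ fs, e ≠ [] := by
    intro e he
    have := List.all_eq_true.mp hpre0 e he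
    simpa using this
  unfold Spec_email_and_parked email_and_parked
  have hnd : (fs.foldl pvGroupStep PySem.Dict.empty).keys.Nodup :=
    pvNodupKeys fs _ (by simp [PySem.Dict.keys_empty])
  have hget : ∀ k, (fs.foldl pvGroupStep PySem.Dict.empty).get? k =
      (match pvMatches k fs with
       | [] => none
       | m :: ms => some (m ++ ms.flatMap List.tail)) := by
    intro k
    rw [pvGet?_build fs hpre PySem.Dict.empty k, PySem.Dict.get?_empty]
  have hmemfacts : ∀ e ∈ pvMatches klaus fs, e.headD "" = klaus ∧ e ≠ [] := by
    intro e he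
    have h1 := List.mem_filter.mp he
    exact ⟨by simpa using h1.2, hpre e h1.1⟩
  have hval : ∀ k ∈ (fs.foldl pvGroupStep PySem.Dict.empty).keys,
      ((fs.foldl pvGroupStep PySem.Dict.empty).getD k []).headD "" = k ∧
      (fs.foldl pvGroupStep PySem.Dict.empty).getD k [] ≠ [] := by
    intro k hk
    have hne : (fs.foldl pvGroupStep PySem.Dict.empty).get? k ≠ none := by
      intro hc
      exact ((PySem.Dict.get?_eq_none_iff_not_mem_keys _ k).mp hc) hk
    rw [hget k] at hne
    cases hmk : pvMatches k fs with
    | nil => rw [hmk] at hne; simp at hne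
    | cons m ms =>
      have hmem : m ∈ pvMatches k fs := by rw [hmk]; simp
      have h1 := List.mem_filter.mp hmem
      obtain ⟨mt, rfl⟩ : ∃ mt, m = k :: mt := by
        cases m with
        | nil => exact absurd rfl (hpre [] h1.1)
        | cons a mt =>
          have ha : a = k := by simpa using h1.2
          exact ⟨mt, by rw [ha]⟩
      rw [PySem.Dict.getD_eq_get?_getD, hget k, hmk]
      simp
  rw [PySem.Dict.values_eq_map_keys _ hnd [], pvScan_map klaus _ _ hval]
  have hB : email_and_parked_alt klaus fs =
      (if (pvMatches klaus fs).isEmpty then none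
       else (if (pvMatches klaus fs).any (fun e => e.any (fun s => s == "Yes")) then some "Yes" else some "No")) := by
    unfold email_and_parked_alt
    rw [pvFoldB klaus fs hpre]
    cases hE : (pvMatches klaus fs).isEmpty <;> simp [hE]
  rw [hB]
  cases hm : pvMatches klaus fs with
  | nil =>
    have hnot : klaus ∉ (fs.foldl pvGroupStep PySem.Dict.empty).keys := by
      refine (PySem.Dict.get?_eq_none_iff_not_mem_keys _ klaus).mp ?_
      rw [hget klaus, hm]
    simp [hnot]
  | cons m ms =>
    have hsome : (fs.foldl pvGroupStep PySem.Dict.empty).get? klaus = some (m ++ ms.flatMap List.tail) := by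
      rw [hget klaus, hm]
    have hmem : klaus ∈ (fs.foldl pvGroupStep PySem.Dict.empty).keys := by
      by_contra hc
      rw [(PySem.Dict.get?_eq_none_iff_not_mem_keys _ klaus).mpr hc] at hsome
      cases hsome
    have hgd := PySem.Dict.getD_of_get?_eq_some _ [] hsome
    rw [if_pos hmem, hgd]
    have hmsfacts : ∀ e ∈ ms, e.headD "" = klaus ∧ e ≠ [] := by
      intro e he
      exact hmemfacts e (by rw [hm]; simp [he])
    obtain ⟨hmhead, hmne2⟩ := hmemfacts m (by rw [hm]; simp)
    rw [pvBridge klaus m ms hmhead hmne2 hmsfacts]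
    simp
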